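-- pv_equiv track=rewrite | github.com/jake0319/- | 문자열처리/[PCCP모의1차]_1)외톨이알파벳.py | solution
-- ===== SOURCE A (Python) =====
-- from collections import defaultdict
--
-- def solution(input_string):
--     answer=[]
--     count_table = defaultdict(list) # 딕셔너리 참조 기본값을 []로 설정
--     for i,v in enumerate(input_string):
--         count_table[v].append(i) # 알파벳별로 검색되는 idx를 추가;
--     for key,lists in count_table.items():
--         if len(lists)>=2: #2번이상 검색되는 요소만
--             for i in range(len(lists)-1):
--                 if lists[i+1]-lists[i]>=2:
--                     if key not in answer:
--                         answer.append(key)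
--     if len(answer) == 0:
--         return 'N'
--     answer.sort()
--     return ''.join(answer)
-- ===== SOURCE B (Python) =====
-- def solution(input_string):
--     last_index = {}
--     lonely = set()
--     for i, v in enumerate(input_string):
--         if v in last_index and i - last_index[v] >= 2:
--             lonely.add(v)
--         last_index[v] = i
--     if not lonely:
--         return 'N'
--     return ''.join(sorted(lonely))
-- ===== Notes on version B (the rewrite author's own statement) =====
-- stated objective: simpler
-- what changed: single fused pass keeping only each char's most recent index and a set of lonely chars, instead of building per-char index lists and then scanning every adjacent pair of every list in a second phase
import Mathlib
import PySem

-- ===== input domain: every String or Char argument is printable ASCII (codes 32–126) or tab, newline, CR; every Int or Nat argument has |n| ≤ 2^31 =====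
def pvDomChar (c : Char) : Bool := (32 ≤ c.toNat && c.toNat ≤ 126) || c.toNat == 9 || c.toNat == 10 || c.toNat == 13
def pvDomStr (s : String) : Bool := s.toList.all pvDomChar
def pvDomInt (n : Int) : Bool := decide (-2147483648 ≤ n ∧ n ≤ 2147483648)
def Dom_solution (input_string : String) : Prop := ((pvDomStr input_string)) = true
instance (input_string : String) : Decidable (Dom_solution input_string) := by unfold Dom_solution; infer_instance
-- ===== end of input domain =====

-- B replaces A's per-char index lists and second adjacency-scanning phase by one fused pass
-- that keeps only each char's most recent index and a set of lonely chars (objective: simpler).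

-- ===== PORT A =====
-- count_table[v].append(i) on a defaultdict(list) is Dict.modify v [] (· ++ [i]);
-- answer.sort()/''.join(answer) on single-char strings is sorting chars by code point
-- (key c.toNat, Python's order on length-1 strings) and packing them into a String.
def solution (input_string : String) : String :=
  let count_table : PySem.Dict Char (List Int) :=
    (PySem.List.enumerate input_string.toList 0).foldl
      (fun d p => d.modify p.2 [] (fun lst => lst ++ [p.1])) PySem.Dict.empty
  let answer : List Char :=
    count_table.items.foldl
      (fun ans kv =>
        if (kv.2.length : Int) ≥ 2 then
          (PySem.List.pyRange 0 ((kv.2.length : Int) - 1) 1).foldl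
            (fun ans i =>
              if PySem.List.pyGetD kv.2 (i + 1) 0 - PySem.List.pyGetD kv.2 i 0 ≥ 2 then
                if kv.1 ∈ ans then ans else ans ++ [kv.1]
              else ans) ans
        else ans) []
  if (answer.length : Int) = 0 then "N"
  else String.ofList (PySem.List.sorted answer (fun c => c.toNat) false)

-- ===== PORT B =====
def solution_alt (input_string : String) : String :=
  let st : PySem.Dict Char Int × PySem.Set Char :=
    (PySem.List.enumerate input_string.toList 0).foldl
      (fun st p =>
        let lonely :=
          match st.1.get? p.2 with
          | some j => if p.1 - j ≥ 2 then PySem.Set.add st.2 p.2 else st.2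
          | none => st.2
        (st.1.insert p.2 p.1, lonely)) (PySem.Dict.empty, PySem.Set.empty)
  if st.2 = [] then "N"
  else String.ofList (PySem.List.sorted st.2 (fun c => c.toNat) false)

-- ===== PRECONDITION & SPEC =====
def Spec_solution (input_string : String) (out : String) : Prop := out = solution_alt input_string
instance (input_string : String) (out : String) : Decidable (Spec_solution input_string out) := by unfold Spec_solution; infer_instance

-- ===== CLAIM (what is proved, stated in full; the proofs are below) =====
def Claim_equal_solution : Prop := ∀ (input_string : String), Dom_solution input_string → Spec_solution input_string (solution input_string)

-- ===== LEMMAS AND PROOFS =====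

-- indices (as Python ints) at which c occurs in l
def pvOcc (l : List Char) (c : Char) : List Int :=
  ((PySem.List.enumerate l 0).filter (fun p => p.2 == c)).map (·.1)

-- some adjacent pair of the index list is ≥ 2 apart
def pvGap : List Int → Bool
  | x :: y :: t => decide (y - x ≥ 2) || pvGap (y :: t)
  | _ => false

-- A's first loop (the count_table), B's loop (last_index, lonely), and A's final answer list
def pvCtA (l : List Char) : PySem.Dict Char (List Int) :=
  (PySem.List.enumerate l 0).foldl
    (fun d p => d.modify p.2 [] (fun lst => lst ++ [p.1])) PySem.Dict.empty

def pvStB (l : List Char) : PySem.Dict Char Int × PySem.Set Char :=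
  (PySem.List.enumerate l 0).foldl
    (fun st p =>
      let lonely :=
        match st.1.get? p.2 with
        | some j => if p.1 - j ≥ 2 then PySem.Set.add st.2 p.2 else st.2
        | none => st.2
      (st.1.insert p.2 p.1, lonely)) (PySem.Dict.empty, PySem.Set.empty)

def pvAnsA (l : List Char) : List Char :=
  (pvCtA l).items.foldl
    (fun ans kv =>
      if (kv.2.length : Int) ≥ 2 then
        (PySem.List.pyRange 0 ((kv.2.length : Int) - 1) 1).foldl
          (fun ans i =>
            if PySem.List.pyGetD kv.2 (i + 1) 0 - PySem.List.pyGetD kv.2 i 0 ≥ 2 then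
              if kv.1 ∈ ans then ans else ans ++ [kv.1]
            else ans) ans
      else ans) []

theorem pvOcc_append (l : List Char) (c' c : Char) :
    pvOcc (l ++ [c']) c = pvOcc l c ++ if c' = c then [(l.length : Int)] else [] := by
  simp [pvOcc, PySem.List.enumerate_append, PySem.List.enumerate_cons, List.filter_append]
  split <;> simp_all

theorem pvOcc_eq_nil_of_not_mem {l : List Char} {c : Char} (h : c ∉ l) : pvOcc l c = [] := by
  simp only [pvOcc, List.map_eq_nil_iff, List.filter_eq_nil_iff]
  intro p hp
  obtain ⟨k, hk, rfl⟩ := (PySem.List.mem_enumerate_iff l 0 p).mp hp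
  simp only [beq_iff_eq]
  intro hc; exact h (hc ▸ List.getElem_mem hk)

theorem pvGap_append (xs : List Int) (i : Int) :
    pvGap (xs ++ [i]) =
      (pvGap xs || match xs.getLast? with
                   | some j => decide (i - j ≥ 2)
                   | none => false) := by
  induction xs with
  | nil => simp [pvGap]
  | cons x t ih =>
    cases t with
    | nil => simp [pvGap]
    | cons y t' =>
      show (decide (y - x ≥ 2) || pvGap ((y :: t') ++ [i])) = _
      rw [ih]
      simp [pvGap, List.getLast?_cons_cons, Bool.or_assoc]

theorem pvGap_short {xs : List Int} (h : ¬ ((xs.length : Int) ≥ 2)) : pvGap xs = false := by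
  match xs with
  | [] => rfl
  | [x] => rfl
  | x :: y :: t => simp at h; omega

theorem pvGap_iff (xs : List Int) :
    pvGap xs = true ↔ ∃ k, k + 1 < xs.length ∧ xs.getD (k+1) 0 - xs.getD k 0 ≥ 2 := by
  induction xs with
  | nil => simp [pvGap]
  | cons x t ih =>
    cases t with
    | nil => simp [pvGap]
    | cons y t' =>
      simp only [pvGap, Bool.or_eq_true, decide_eq_true_eq, ih]
      constructor
      · rintro (h | ⟨k, hk, h⟩)
        · exact ⟨0, by simp, by simpa using h⟩
        · exact ⟨k + 1, by simpa using hk, by simpa using h⟩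
      · rintro ⟨k, hk, h⟩
        cases k with
        | zero => left; simpa using h
        | succ k => right; exact ⟨k, by simpa using hk, by simpa using h⟩

theorem pvCtA_append (l : List Char) (c : Char) :
    pvCtA (l ++ [c]) = (pvCtA l).modify c [] (fun lst => lst ++ [(l.length : Int)]) := by
  simp [pvCtA, PySem.List.enumerate_append, PySem.List.enumerate_cons, PySem.List.enumerate_nil,
    List.foldl_append]

theorem pvFind?_keyed (ks : List Char) (g : Char → List Int) (c : Char) (h : c ∈ ks) :
    (ks.map (fun k => (k, g k))).find? (fun p => p.1 == c) = some (c, g c) := by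
  induction ks with
  | nil => simp at h
  | cons k t ih =>
    by_cases hk : k = c
    · subst hk; simp
    · have : c ∈ t := (List.mem_cons.mp h).resolve_left (fun h' => hk h'.symm)
      simp [hk, ih this]

-- invariant for A's first loop: the dict holds, per distinct char in first-occurrence
-- order, the list of its occurrence indices
theorem pvCtA_items (l : List Char) :
    (pvCtA l).items = (PySem.List.dedup l).map (fun c => (c, pvOcc l c)) := by
  induction l using List.reverseRecOn with
  | nil => rfl
  | append_singleton l c ih =>
    rw [pvCtA_append]
    have hded : PySem.List.dedup (l ++ [c]) = PySem.Set.add (PySem.List.dedup l) c := by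
      simp [PySem.List.dedup_eq_ofList, PySem.Set.ofList_append_singleton]
    simp only [PySem.Dict.modify, PySem.Dict.getD]
    by_cases hc : c ∈ l
    · have hmem : c ∈ PySem.List.dedup l := by simp [hc]
      have hget : (pvCtA l).get? c = some (pvOcc l c) := by
        simp only [PySem.Dict.get?, ih, pvFind?_keyed _ _ _ hmem, Option.map_some]
      have hcont : (pvCtA l).contains c = true := by
        simp only [PySem.Dict.contains, ih, List.any_map, List.any_eq_true]
        exact ⟨c, hmem, by simp⟩
      rw [hded, PySem.Set.add_of_mem hmem]
      simp only [PySem.Dict.insert, hcont, if_pos, hget, Option.getD_some, ih, List.map_map]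
      apply List.map_congr_left
      intro k hk
      by_cases hkc : k = c
      · subst hkc
        simp [pvOcc_append, Function.comp]
      · simp [Function.comp, hkc, Ne.symm hkc, pvOcc_append]
    · have hmem : c ∉ PySem.List.dedup l := by simp [hc]
      have hget : (pvCtA l).get? c = none := by
        simp only [PySem.Dict.get?, ih, Option.map_eq_none_iff, List.find?_eq_none]
        rintro ⟨k, v⟩ hkv
        obtain ⟨k', hk', heq⟩ := List.mem_map.mp hkv
        cases heq
        simp only [beq_iff_eq]
        intro h; exact hmem (h ▸ hk')
      have hcont : (pvCtA l).contains c = false := by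
        simp only [PySem.Dict.contains, ih, List.any_map, List.any_eq_false]
        intro k hk
        simp only [Function.comp, beq_iff_eq]
        intro h; exact hmem (h ▸ hk)
      rw [hded, PySem.Set.add_of_not_mem hmem]
      simp only [PySem.Dict.insert, hcont, Bool.false_eq_true, reduceIte, hget, Option.getD_none,
        List.nil_append, ih, List.map_append, List.map_cons, List.map_nil]
      have h1 : List.map (fun k => (k, pvOcc l k)) (PySem.List.dedup l)
          = List.map (fun k => (k, pvOcc (l ++ [c]) k)) (PySem.List.dedup l) := by
        apply List.map_congr_left
        intro k hk
        have hkc : c ≠ k := fun h => hmem (h ▸ hk)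
        simp [pvOcc_append, hkc]
      have h2 : pvOcc (l ++ [c]) c = [(l.length : Int)] := by
        simp [pvOcc_append, pvOcc_eq_nil_of_not_mem hc]
      rw [h1, h2]

theorem pvStB_append (l : List Char) (c : Char) :
    pvStB (l ++ [c]) =
      ((pvStB l).1.insert c (l.length : Int),
       match (pvStB l).1.get? c with
       | some j => if (l.length : Int) - j ≥ 2 then PySem.Set.add (pvStB l).2 c else (pvStB l).2
       | none => (pvStB l).2) := by
  simp [pvStB, PySem.List.enumerate_append, PySem.List.enumerate_cons, PySem.List.enumerate_nil,
    List.foldl_append]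

-- invariant for B's loop: last_index holds each char's most recent index,
-- lonely is a duplicate-free list holding exactly the chars with an adjacency gap ≥ 2
theorem pvStB_inv (l : List Char) :
    (∀ c, (pvStB l).1.get? c = (pvOcc l c).getLast?) ∧
    (pvStB l).2.Nodup ∧
    (∀ c, c ∈ (pvStB l).2 ↔ pvGap (pvOcc l c) = true) := by
  induction l using List.reverseRecOn with
  | nil =>
    refine ⟨fun c => rfl, List.nodup_nil, fun c => by simp [pvStB, pvOcc, pvGap, PySem.Set.empty]⟩
  | append_singleton l c ih =>
    obtain ⟨h1, h2, h3⟩ := ih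
    rw [pvStB_append]
    refine ⟨?_, ?_, ?_⟩
    · intro c'
      by_cases hc : c' = c
      · subst hc
        simp [PySem.Dict.get?_insert_self, pvOcc_append]
      · simp [PySem.Dict.get?_insert_of_ne _ _ hc, pvOcc_append, Ne.symm hc, h1]
    · rw [h1]
      cases hg : (pvOcc l c).getLast? with
      | none => exact h2
      | some j =>
        dsimp only
        split
        · exact PySem.Set.nodup_add _ _ h2
        · exact h2
    · intro c'
      rw [h1]
      by_cases hc : c' = c
      · subst hc
        rw [pvOcc_append, if_pos rfl, pvGap_append]
        cases hg : (pvOcc l c').getLast? with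
        | none =>
          have hnil : pvOcc l c' = [] := List.getLast?_eq_none_iff.mp hg
          simp [hnil, h3, pvGap]
        | some j =>
          dsimp only
          by_cases hj : (l.length : Int) - j ≥ 2
          · simp [hj, PySem.Set.mem_add]
          · simp [hj, h3]
      · have hocc : pvOcc (l ++ [c]) c' = pvOcc l c' := by
          simp [pvOcc_append, Ne.symm hc]
        rw [hocc]
        cases hg : (pvOcc l c).getLast? with
        | none => exact h3 c'
        | some j =>
          dsimp only
          split
          · rw [PySem.Set.mem_add]
            simp [hc, h3]
          · exact h3 c'

theorem pvAddOnce_mem (p : Int → Prop) [DecidablePred p] (key : Char) (is : List Int)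
    (ans : List Char) (h : key ∈ ans) :
    is.foldl (fun ans i => if p i then (if key ∈ ans then ans else ans ++ [key]) else ans) ans
      = ans := by
  induction is with
  | nil => rfl
  | cons i t ih => by_cases hp : p i <;> simp [hp, h, ih]

theorem pvAddOnce (p : Int → Prop) [DecidablePred p] (key : Char) (is : List Int)
    (ans : List Char) (h : key ∉ ans) :
    is.foldl (fun ans i => if p i then (if key ∈ ans then ans else ans ++ [key]) else ans) ans
      = if ∃ i ∈ is, p i then ans ++ [key] else ans := by
  induction is with
  | nil => simp
  | cons i t ih =>
    by_cases hp : p i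
    · have : key ∈ ans ++ [key] := by simp
      simp only [List.foldl_cons, if_pos hp, if_neg h, pvAddOnce_mem p key t _ this]
      simp [hp]
    · simp only [List.foldl_cons, if_neg hp, ih]
      have : (∃ j ∈ i :: t, p j) ↔ (∃ j ∈ t, p j) := by simp [hp]
      rw [if_congr this rfl rfl]

-- A's inner loop over range(len(lists)-1) adds the key exactly once iff some gap is ≥ 2
theorem pvInner (key : Char) (xs : List Int) (ans : List Char) (h : key ∉ ans) :
    (PySem.List.pyRange 0 ((xs.length : Int) - 1) 1).foldl
      (fun ans i =>
        if PySem.List.pyGetD xs (i + 1) 0 - PySem.List.pyGetD xs i 0 ≥ 2 then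
          if key ∈ ans then ans else ans ++ [key]
        else ans) ans
    = if pvGap xs then ans ++ [key] else ans := by
  rw [pvAddOnce _ key _ _ h]
  congr 1
  rw [eq_iff_iff]
  rw [show (pvGap xs = true) ↔ _ from pvGap_iff xs]
  constructor
  · rintro ⟨i, hi, hp⟩
    rw [PySem.List.mem_pyRange_one] at hi
    obtain ⟨k, rfl⟩ : ∃ k : Nat, i = (k : Int) := ⟨i.toNat, (Int.toNat_of_nonneg hi.1).symm⟩
    refine ⟨k, by omega, ?_⟩
    have h1 : ((k : Int) + 1) = ((k + 1 : Nat) : Int) := by push_cast; ring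
    rw [h1, PySem.List.pyGetD_natCast, PySem.List.pyGetD_natCast] at hp
    exact hp
  · rintro ⟨k, hk, hp⟩
    refine ⟨(k : Int), ?_, ?_⟩
    · rw [PySem.List.mem_pyRange_one]; constructor <;> omega
    · have h1 : ((k : Int) + 1) = ((k + 1 : Nat) : Int) := by push_cast; ring
      rw [h1, PySem.List.pyGetD_natCast, PySem.List.pyGetD_natCast]
      exact hp

-- A's outer loop over the dict items = filtering the keys by pvGap
theorem pvOuter (ds : List (Char × List Int)) (ans : List Char)
    (hn : (ds.map (·.1)).Nodup) (hd : ∀ kv ∈ ds, kv.1 ∉ ans) :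
    ds.foldl
      (fun ans kv =>
        if (kv.2.length : Int) ≥ 2 then
          (PySem.List.pyRange 0 ((kv.2.length : Int) - 1) 1).foldl
            (fun ans i =>
              if PySem.List.pyGetD kv.2 (i + 1) 0 - PySem.List.pyGetD kv.2 i 0 ≥ 2 then
                if kv.1 ∈ ans then ans else ans ++ [kv.1]
              else ans) ans
        else ans) ans
    = ans ++ (ds.filter (fun kv => pvGap kv.2)).map (·.1) := by
  induction ds generalizing ans with
  | nil => simp
  | cons kv t ih =>
    obtain ⟨key, xs⟩ := kv
    have hkey : key ∉ ans := hd _ List.mem_cons_self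
    have hstep :
        (if ((xs.length : Int) ≥ 2) then
          (PySem.List.pyRange 0 ((xs.length : Int) - 1) 1).foldl
            (fun ans i =>
              if PySem.List.pyGetD xs (i + 1) 0 - PySem.List.pyGetD xs i 0 ≥ 2 then
                if key ∈ ans then ans else ans ++ [key]
              else ans) ans
         else ans) = if pvGap xs then ans ++ [key] else ans := by
      by_cases hl : ((xs.length : Int) ≥ 2)
      · rw [if_pos hl, pvInner key xs ans hkey]
      · rw [if_neg hl, pvGap_short hl]; simp
    simp only [List.foldl_cons, hstep]
    have hnt : (t.map (·.1)).Nodup := (List.nodup_cons.mp hn).2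
    have hknt : key ∉ t.map (·.1) := (List.nodup_cons.mp hn).1
    by_cases hg : pvGap xs
    · rw [if_pos hg]
      have hdt : ∀ kv ∈ t, kv.1 ∉ ans ++ [key] := by
        intro kv hkv
        simp only [List.mem_append, List.mem_singleton, not_or]
        refine ⟨hd _ (List.mem_cons_of_mem _ hkv), ?_⟩
        intro h; exact hknt (h ▸ List.mem_map_of_mem hkv)
      rw [ih _ hnt hdt]
      simp [hg, List.append_assoc]
    · rw [if_neg hg]
      have hdt : ∀ kv ∈ t, kv.1 ∉ ans := fun kv hkv => hd _ (List.mem_cons_of_mem _ hkv)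
      rw [ih _ hnt hdt]
      simp [hg]

theorem pvAnsA_eq (l : List Char) :
    pvAnsA l = (PySem.List.dedup l).filter (fun c => pvGap (pvOcc l c)) := by
  unfold pvAnsA
  rw [pvCtA_items]
  have hn : (((PySem.List.dedup l).map (fun c => (c, pvOcc l c))).map (·.1)).Nodup := by
    rw [List.map_map,
      show ((fun x : Char × List Int => x.1) ∘ fun c => (c, pvOcc l c)) = id from rfl,
      List.map_id]
    exact PySem.List.nodup_dedup l
  rw [pvOuter _ [] hn (by simp), List.nil_append, List.filter_map, List.map_map]
  simp only [Function.comp_def]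
  simp

theorem pvSorted_congr (xs ys : List Char) (hx : xs.Nodup) (hy : ys.Nodup)
    (hm : ∀ c, c ∈ xs ↔ c ∈ ys) :
    PySem.List.sorted xs (fun c => c.toNat) false
      = PySem.List.sorted ys (fun c => c.toNat) false := by
  have hperm : ys.Perm xs := (List.perm_ext_iff_of_nodup hy hx).mpr (fun c => (hm c).symm)
  apply PySem.List.sorted_eq_of_perm_of_pairwise_lt
  · exact (PySem.List.sorted_perm ys (fun c => c.toNat) false).trans hperm
  · have hle := PySem.List.sorted_pairwise ys (fun c => c.toNat)
    have hnd : (PySem.List.sorted ys (fun c => c.toNat) false).Nodup :=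
      ((PySem.List.sorted_perm ys (fun c => c.toNat) false).nodup_iff).mpr hy
    have hne : (PySem.List.sorted ys (fun c => c.toNat) false).Pairwise (· ≠ ·) :=
      List.Pairwise.imp (fun h => h) hnd
    refine (hle.and hne).imp ?_
    rintro a b ⟨h1, h2⟩
    have : a.toNat ≠ b.toNat := fun h => h2 (Char.ext (UInt32.toNat_inj.mp h))
    omega

-- ===== VERDICT (by name: the statement is the Claim_ definition above) =====
theorem solution_spec : Claim_equal_solution := by
  intro s _
  unfold Spec_solution
  set l := s.toList with hl
  have hA : solution s =
      (if ((pvAnsA l).length : Int) = 0 then "N"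
       else String.ofList (PySem.List.sorted (pvAnsA l) (fun c => c.toNat) false)) := rfl
  have hB : solution_alt s =
      (if (pvStB l).2 = [] then "N"
       else String.ofList (PySem.List.sorted (pvStB l).2 (fun c => c.toNat) false)) := rfl
  rw [hA, hB]
  obtain ⟨h1, h2, h3⟩ := pvStB_inv l
  have hndA : (pvAnsA l).Nodup := by
    rw [pvAnsA_eq]; exact (PySem.List.nodup_dedup l).filter _
  have hmem : ∀ c, c ∈ pvAnsA l ↔ c ∈ (pvStB l).2 := by
    intro c
    rw [pvAnsA_eq, List.mem_filter, h3, PySem.List.mem_dedup]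
    constructor
    · rintro ⟨-, h⟩; exact h
    · intro h
      refine ⟨?_, h⟩
      by_contra hc
      rw [pvOcc_eq_nil_of_not_mem hc] at h
      simp [pvGap] at h
  have hperm : (pvAnsA l).Perm (pvStB l).2 :=
    (List.perm_ext_iff_of_nodup hndA h2).mpr hmem
  by_cases h0 : pvAnsA l = []
  · have h0' : (pvStB l).2 = [] := (h0 ▸ hperm).symm.eq_nil
    rw [if_pos (by simp [h0]), if_pos h0']
  · have h0' : (pvStB l).2 ≠ [] := fun h => h0 ((h ▸ hperm).eq_nil)
    rw [if_neg (by simpa using h0), if_neg h0']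
    rw [pvSorted_congr _ _ hndA h2 hmem]
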